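-- pv_equiv track=rewrite | github.com/soffiafdz/palimpsest | dev/dataclasses/parsers/yaml_to_db.py | find_person_in_parsed
-- ===== SOURCE A (Python) =====
-- from typing import Dict, Any, List, Optional, Union, Tuple
--
-- def find_person_in_parsed(
--     person_str: str, people_parsed: Dict[str, List]
-- ) -> Optional[Dict[str, Optional[str]]]:
--     """
--     Look up a person string in the parsed people structure.
--
--     Used when dates or other fields reference people by name.
--     Searches through both regular people and aliases.
--
--     Args:
--         person_str: Name to look up (can be "@Alias" or "Name")
--         people_parsed: Result from parse_people_field()
--
--     Returns:
--         Person dict if found, None otherwise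
--
--     Examples:
--         >>> people = {"people": [{"name": "John"}], "alias": [{"alias": "Johnny", "name": "John"}]}
--         >>> find_person_in_parsed("John", people)
--         {"name": "John"}
--         >>> find_person_in_parsed("@Johnny", people)
--         {"alias": "Johnny", "name": "John"}
--     """
--     search_str = person_str.strip()
--
--     # Handle @alias format
--     if search_str.startswith("@"):
--         alias_name = search_str[1:]
--         for alias_spec in people_parsed.get("alias", []):
--             if alias_spec.get("alias") == alias_name:
--                 return alias_spec
--         return None
--
--     # Search in regular people
--     # Priority: exact name match > exact full_name match > first name of full_name
--     for person_spec in people_parsed.get("people", []):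
--         # Exact match on name field
--         if person_spec.get("name") == search_str:
--             return person_spec
--         # Exact match on full_name field
--         if person_spec.get("full_name") == search_str:
--             return person_spec
--
--     # Second pass: try matching against first name from full_name
--     # This allows "Daniel" to match {"name": "Daniel", "full_name": "Daniel Andrews"}
--     for person_spec in people_parsed.get("people", []):
--         name = person_spec.get("name")
--         if name and search_str:
--             # If name matches search exactly, already returned above
--             # Check if search_str matches first word of name (for compound first names)
--             first_word = name.split()[0] if " " in name else name
--             if first_word == search_str:
--                 return person_spec
--
--     return None
-- ===== SOURCE B (Python) =====
-- def find_person_in_parsed(person_str, people_parsed):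
--     """Single pass over people with a fallback accumulator instead of A's two scans."""
--     search_str = person_str.strip()
--
--     if search_str.startswith("@"):
--         alias_name = search_str[1:]
--         return next(
--             (a for a in people_parsed.get("alias", []) if a.get("alias") == alias_name),
--             None,
--         )
--
--     fallback = None
--     for person in people_parsed.get("people", []):
--         name = person.get("name")
--         if search_str == name or search_str == person.get("full_name"):
--             return person
--         if fallback is None and search_str and name and " " in name:
--             parts = name.split()
--             if parts and parts[0] == search_str:
--                 fallback = person
--     return fallback
-- ===== Notes on version B (the rewrite author's own statement) =====
-- stated objective: simpler
-- what changed: A's two separate scans over the people list (exact pass, then first-word pass) are folded into a single loop that returns on an exact match and records the first first-word match in a fallback accumulator returned at the end; the alias scan becomes a next()/find? one-liner.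
-- outside the precondition, e.g. on find_person_in_parsed('Bo', {'people': [{'name': ' '}]}): A raises IndexError, B returns None
import Mathlib
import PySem

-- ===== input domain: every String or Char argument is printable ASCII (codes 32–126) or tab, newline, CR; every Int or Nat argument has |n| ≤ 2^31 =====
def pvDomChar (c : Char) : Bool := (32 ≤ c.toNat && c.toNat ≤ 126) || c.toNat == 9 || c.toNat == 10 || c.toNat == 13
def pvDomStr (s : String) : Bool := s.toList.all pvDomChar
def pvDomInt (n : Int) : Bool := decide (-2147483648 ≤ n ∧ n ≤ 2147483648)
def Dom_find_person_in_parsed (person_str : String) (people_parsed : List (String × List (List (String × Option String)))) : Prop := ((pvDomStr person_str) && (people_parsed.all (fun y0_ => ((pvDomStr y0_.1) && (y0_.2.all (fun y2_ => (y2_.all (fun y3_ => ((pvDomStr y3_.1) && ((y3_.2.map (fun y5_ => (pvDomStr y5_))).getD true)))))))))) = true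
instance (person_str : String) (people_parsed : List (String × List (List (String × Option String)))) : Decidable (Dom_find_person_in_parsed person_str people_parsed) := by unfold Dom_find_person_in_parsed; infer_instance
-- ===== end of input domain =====

-- B replaces A's two scans over the people list by a single loop with a fallback accumulator (simpler; return value only, no side effects).

-- shared helper: Python dict lookup (first matching key) on an association list
def fpipLookup {ν : Type} (k : String) : List (String × ν) → Option ν
  | [] => none
  | (k', v) :: rest => if k' == k then some v else fpipLookup k rest

-- person.get("key") : value or None, flattened to Option String
def fpipGet (p : List (String × Option String)) (k : String) : Option String :=
  (fpipLookup k p).getD none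

-- ===== PORT A =====
-- the alias loop of A
def fpipAliasScan (aliasName : String) : List (List (String × Option String)) → Option (List (String × Option String))
  | [] => none
  | a :: rest => if fpipGet a "alias" == some aliasName then some a else fpipAliasScan aliasName rest

-- A's first pass: exact name / full_name match
def fpipPass1 (s : String) : List (List (String × Option String)) → Option (List (String × Option String))
  | [] => none
  | p :: rest =>
    if fpipGet p "name" == some s then some p
    else if fpipGet p "full_name" == some s then some p
    else fpipPass1 s rest

-- A's second-pass loop-body condition; where Python raises IndexError (name whitespace-only
-- yet containing ' ', so name.split() == []) the head? is none and the condition is false —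
-- those inputs are outside Pre_, so the port's value there is not claimed
def fpipAcond (s : String) (name? : Option String) : Bool :=
  match name? with
  | some n =>
    if n != "" && s != "" then
      ((if PySem.Str.isIn " " n then (PySem.Str.split₀ n).head? else some n) == some s)
    else false
  | none => false

-- A's second pass: first word of name
def fpipPass2 (s : String) : List (List (String × Option String)) → Option (List (String × Option String))
  | [] => none
  | p :: rest => if fpipAcond s (fpipGet p "name") then some p else fpipPass2 s rest

def find_person_in_parsed (person_str : String) (people_parsed : List (String × List (List (String × Option String)))) : Option (List (String × Option String)) :=
  let search := PySem.Str.strip person_str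
  if PySem.Str.startswith search "@" then
    let aliasName := PySem.Str.slice search (some 1) none
    fpipAliasScan aliasName ((fpipLookup "alias" people_parsed).getD [])
  else
    match fpipPass1 search ((fpipLookup "people" people_parsed).getD []) with
    | some p => some p
    | none => fpipPass2 search ((fpipLookup "people" people_parsed).getD [])

-- ===== PORT B =====
-- B's fallback condition: search nonempty, name truthy, contains ' ', parts nonempty and first part = search
def fpipBcond (s : String) (name? : Option String) : Bool :=
  match name? with
  | some n => s != "" && n != "" && PySem.Str.isIn " " n && ((PySem.Str.split₀ n).head? == some s)
  | none => false

-- B's single loop with fallback accumulator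
def fpipLoopB (s : String) (fallback : Option (List (String × Option String))) : List (List (String × Option String)) → Option (List (String × Option String))
  | [] => fallback
  | p :: rest =>
    let name := fpipGet p "name"
    if name == some s || fpipGet p "full_name" == some s then some p
    else fpipLoopB s (if fallback == none && fpipBcond s name then some p else fallback) rest

def find_person_in_parsed_alt (person_str : String) (people_parsed : List (String × List (List (String × Option String)))) : Option (List (String × Option String)) :=
  let search := PySem.Str.strip person_str
  if PySem.Str.startswith search "@" then
    let aliasName := PySem.Str.slice search (some 1) none
    ((fpipLookup "alias" people_parsed).getD []).find? (fun a => fpipGet a "alias" == some aliasName)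
  else
    fpipLoopB search none ((fpipLookup "people" people_parsed).getD [])

-- ===== PRECONDITION & SPEC =====
-- Pre_ excludes non-alias non-empty searches whose people list contains a "name" value that is
-- whitespace-only yet contains a space: on such a name A's `name.split()[0]` raises IndexError
-- whenever its second pass reaches it (when an earlier exact match preempts the raise, A and B
-- still agree; the exclusion is by the name's shape, slightly wider than the exact raise set).
def fpipBadName (name? : Option String) : Bool :=
  match name? with
  | some n => n != "" && PySem.Str.isIn " " n && (PySem.Str.split₀ n == ([] : List String))
  | none => false

def Pre_find_person_in_parsed (person_str : String) (people_parsed : List (String × List (List (String × Option String)))) : Prop :=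
  (let s := PySem.Str.strip person_str
   PySem.Str.startswith s "@" || s == "" ||
     ((fpipLookup "people" people_parsed).getD []).all (fun p => !(fpipBadName (fpipGet p "name")))) = true

instance (person_str : String) (people_parsed : List (String × List (List (String × Option String)))) : Decidable (Pre_find_person_in_parsed person_str people_parsed) := by unfold Pre_find_person_in_parsed; infer_instance

def pvWitness_find_person_in_parsed : String × (List (String × List (List (String × Option String)))) :=
  ("Jo", [("people", [[("name", some "Jo Bo")]])])

def Spec_find_person_in_parsed (person_str : String) (people_parsed : List (String × List (List (String × Option String)))) (out : Option (List (String × Option String))) : Prop := out = find_person_in_parsed_alt person_str people_parsed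
instance (person_str : String) (people_parsed : List (String × List (List (String × Option String)))) (out : Option (List (String × Option String))) : Decidable (Spec_find_person_in_parsed person_str people_parsed out) := by unfold Spec_find_person_in_parsed; infer_instance

-- ===== CLAIM (what is proved, stated in full; the proofs are below) =====
def Claim_equal_find_person_in_parsed : Prop := ∀ (person_str : String) (people_parsed : List (String × List (List (String × Option String)))), Dom_find_person_in_parsed person_str people_parsed → Pre_find_person_in_parsed person_str people_parsed → Spec_find_person_in_parsed person_str people_parsed (find_person_in_parsed person_str people_parsed)

-- ===== LEMMAS AND PROOFS =====

-- the two alias scans agree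
theorem aliasScan_eq_find? (aliasName : String) (l : List (List (String × Option String))) :
    fpipAliasScan aliasName l = l.find? (fun a => fpipGet a "alias" == some aliasName) := by
  induction l with
  | nil => rfl
  | cons a rest ih =>
    by_cases h : fpipGet a "alias" == some aliasName
    · simp [fpipAliasScan, List.find?, h]
    · simp only [Bool.not_eq_true] at h
      simp [fpipAliasScan, List.find?, h, ih]

-- on a person whose name is not an exact match, A's second-pass condition equals B's fallback condition
theorem acond_eq_bcond (s : String) (name? : Option String) (h : name? ≠ some s) :
    fpipAcond s name? = fpipBcond s name? := by
  cases name? with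
  | none => rfl
  | some n =>
    have hne : n ≠ s := fun he => h (by rw [he])
    simp only [fpipAcond, fpipBcond]
    by_cases hsp : PySem.Chars.isIn [' '] n.toList = true
    · by_cases hn : n = "" <;> by_cases hs : s = "" <;> simp [hsp, hn, hs]
    · simp only [Bool.not_eq_true] at hsp
      simp [hsp, hne]

-- B's single loop equals A's two passes (fallback f records the pass-2 winner found so far)
theorem loopB_eq (s : String) (l : List (List (String × Option String))) :
    ∀ f : Option (List (String × Option String)),
    fpipLoopB s f l =
      match fpipPass1 s l with
      | some p => some p
      | none => match f with
        | some q => some q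
        | none => fpipPass2 s l := by
  induction l with
  | nil => intro f; cases f <;> rfl
  | cons p rest ih =>
    intro f
    by_cases h1 : fpipGet p "name" == some s
    · simp [fpipLoopB, fpipPass1, h1]
    · simp only [Bool.not_eq_true] at h1
      by_cases h2 : fpipGet p "full_name" == some s
      · simp [fpipLoopB, fpipPass1, h1, h2]
      · simp only [Bool.not_eq_true] at h2
        have hne : fpipGet p "name" ≠ some s := by
          intro he; rw [he] at h1; simp at h1
        have hc := acond_eq_bcond s (fpipGet p "name") hne
        simp only [fpipLoopB, fpipPass1, fpipPass2, h1, h2, Bool.false_eq_true, if_false,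
          Bool.or_self, ih, ← hc]
        cases f with
        | none =>
          by_cases ha : fpipAcond s (fpipGet p "name") = true
          · simp [ha]
          · simp only [Bool.not_eq_true] at ha
            simp [ha]
        | some q => simp

-- ===== VERDICT (by name: the statement is the Claim_ definition above) =====
theorem find_person_in_parsed_spec : Claim_equal_find_person_in_parsed := by
  intro person_str people_parsed _hDom _hPre
  unfold Spec_find_person_in_parsed find_person_in_parsed find_person_in_parsed_alt
  dsimp only
  split_ifs
  · rw [aliasScan_eq_find?]
  · rw [loopB_eq]
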